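-- pv_equiv track=rewrite | github.com/amrit-das/fine-grain-classification | conf_mat_within_brands.py | brand_mod
-- ===== SOURCE A (Python) =====
-- def brand_mod(x_list):
--     new_list = []
--     for i in x_list:
--         if i in [0,1,2,3,4,5,6,7,8,9,10,11,12,13,14,15,44,45,48,49,54,55,56,57,58]:
--             new_list.append(1)
--         elif i in [16,17,42,43,61]:
--             new_list.append(2)
--         elif i in [18,19,20,21,22,23,24,25,26,27,28,29,30,31,32,33,50,51,52,53,59]:
--             new_list.append(3)
--         else:
--             new_list.append(4)
--     return new_list
-- ===== SOURCE B (Python) =====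
-- # Interval view of the classification: the keys form consecutive runs, so classify
-- # by binary search over sorted interval start points instead of set membership.
-- _STARTS = [0, 16, 18, 34, 42, 44, 46, 48, 50, 54, 59, 60, 61, 62]
-- _CODES  = [1,  2,  3,  4,  2,  1,  4,  1,  3,  1,  3,  4,  2,  4]
--
-- def brand_mod(x_list):
--     out = []
--     for i in x_list:
--         if i < _STARTS[0]:
--             out.append(4)
--         else:
--             # hand-written bisect_right over the start points
--             lo, hi = 0, len(_STARTS)
--             while lo < hi:
--                 mid = (lo + hi) // 2
--                 if i < _STARTS[mid]:
--                     hi = mid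
--                 else:
--                     lo = mid + 1
--             out.append(_CODES[lo - 1])
--     return out
-- ===== Notes on version B (the rewrite author's own statement) =====
-- stated objective: faster
-- what changed: Recasts the three constant key sets as consecutive integer intervals and classifies each element by a hand-written binary search (bisect_right) over the 14 sorted interval start points, replacing A's per-element if/elif membership scans over three lists.
import Mathlib
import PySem

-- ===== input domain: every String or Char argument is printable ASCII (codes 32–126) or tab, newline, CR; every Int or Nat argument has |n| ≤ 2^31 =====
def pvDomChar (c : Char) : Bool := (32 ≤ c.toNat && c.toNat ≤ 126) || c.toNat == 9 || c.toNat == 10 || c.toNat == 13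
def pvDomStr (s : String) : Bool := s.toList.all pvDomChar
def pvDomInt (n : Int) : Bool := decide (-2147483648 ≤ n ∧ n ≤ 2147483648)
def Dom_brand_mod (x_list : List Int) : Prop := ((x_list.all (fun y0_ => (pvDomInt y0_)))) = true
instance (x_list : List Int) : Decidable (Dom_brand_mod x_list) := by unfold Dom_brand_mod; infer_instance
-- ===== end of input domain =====

-- B classifies by binary search over sorted interval start points instead of
-- A's per-element membership ladder over three constant lists (objective: alternative).

-- ===== PORT A =====
-- literal transliteration of A: loop appending to new_list, membership ladder over inline lists
def brand_mod (x_list : List Int) : List Int :=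
  x_list.foldl
    (fun new_list i =>
      if i ∈ ([0,1,2,3,4,5,6,7,8,9,10,11,12,13,14,15,44,45,48,49,54,55,56,57,58] : List Int) then
        new_list ++ [1]
      else if i ∈ ([16,17,42,43,61] : List Int) then
        new_list ++ [2]
      else if i ∈ ([18,19,20,21,22,23,24,25,26,27,28,29,30,31,32,33,50,51,52,53,59] : List Int) then
        new_list ++ [3]
      else
        new_list ++ [4])
    []

-- ===== PORT B =====
def brandStarts : List Int := [0, 16, 18, 34, 42, 44, 46, 48, 50, 54, 59, 60, 61, 62]
def brandCodes : List Int := [1, 2, 3, 4, 2, 1, 4, 1, 3, 1, 3, 4, 2, 4]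

-- the while loop of Source B's hand-written bisect_right; fuel only makes it total
-- (the call supplies fuel = list length, which the loop never exhausts)
def brandBisect (x : Int) : Nat → Nat → Nat → Nat
  | 0, lo, _ => lo
  | fuel + 1, lo, hi =>
    if lo < hi then
      let mid := (lo + hi) / 2
      if x < brandStarts.getD mid 0 then brandBisect x fuel lo mid
      else brandBisect x fuel (mid + 1) hi
    else lo

def brand_mod_alt (x_list : List Int) : List Int :=
  x_list.foldl
    (fun out i =>
      if i < brandStarts.getD 0 0 then out ++ [4]
      else out ++ [brandCodes.getD (brandBisect i brandStarts.length 0 brandStarts.length - 1) 4])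
    []

-- ===== PRECONDITION & SPEC =====
def Spec_brand_mod (x_list : List Int) (out : List Int) : Prop := out = brand_mod_alt x_list
instance (x_list : List Int) (out : List Int) : Decidable (Spec_brand_mod x_list out) := by unfold Spec_brand_mod; infer_instance

-- ===== CLAIM (what is proved, stated in full; the proofs are below) =====
def Claim_equal_brand_mod : Prop := ∀ (x_list : List Int), Dom_brand_mod x_list → Spec_brand_mod x_list (brand_mod x_list)

-- ===== LEMMAS AND PROOFS =====

-- B's per-element value, named for the proofs
def brandB (i : Int) : Int :=
  if i < brandStarts.getD 0 0 then 4
  else brandCodes.getD (brandBisect i brandStarts.length 0 brandStarts.length - 1) 4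

-- A's per-element value, named for the proofs
def brandA (i : Int) : Int :=
  if i ∈ ([0,1,2,3,4,5,6,7,8,9,10,11,12,13,14,15,44,45,48,49,54,55,56,57,58] : List Int) then 1
  else if i ∈ ([16,17,42,43,61] : List Int) then 2
  else if i ∈ ([18,19,20,21,22,23,24,25,26,27,28,29,30,31,32,33,50,51,52,53,59] : List Int) then 3
  else 4

theorem brandA_eq_four_of_lt (i : Int) (h : i < 0) : brandA i = 4 := by
  unfold brandA
  rw [if_neg, if_neg, if_neg] <;> · simp only [List.mem_cons, List.not_mem_nil, or_false]; omega

theorem brandA_eq_four_of_ge (i : Int) (h : 62 ≤ i) : brandA i = 4 := by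
  unfold brandA
  rw [if_neg, if_neg, if_neg] <;> · simp only [List.mem_cons, List.not_mem_nil, or_false]; omega

theorem brandStarts_le (m : Nat) : brandStarts.getD m 0 ≤ 62 := by
  by_cases hm : m < 14
  · interval_cases m <;> decide
  · rw [List.getD_eq_default _ _ (by simp [brandStarts]; omega)]; norm_num

theorem bisect_all_ge (x : Int) (hx : ∀ m : Nat, ¬ x < brandStarts.getD m 0) :
    ∀ fuel lo hi : Nat, hi - lo ≤ fuel → lo ≤ hi → brandBisect x fuel lo hi = hi := by
  intro fuel
  induction fuel with
  | zero => intro lo hi h1 h2; rw [brandBisect]; omega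
  | succ f ih =>
    intro lo hi h1 h2
    rw [brandBisect]
    by_cases hlt : lo < hi
    · rw [if_pos hlt, if_neg (hx _)]
      exact ih _ _ (by omega) (by omega)
    · rw [if_neg hlt]; omega

set_option maxRecDepth 8000 in
theorem brandA_eq_brandB (i : Int) : brandA i = brandB i := by
  by_cases hlo : i < 0
  · rw [brandA_eq_four_of_lt i hlo]
    unfold brandB
    rw [if_pos (by simpa [brandStarts] using hlo)]
  · by_cases hhi : 62 ≤ i
    · rw [brandA_eq_four_of_ge i hhi]
      unfold brandB
      rw [if_neg (by simp [brandStarts]; omega)]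
      have : brandBisect i brandStarts.length 0 brandStarts.length = 14 := by
        have := bisect_all_ge i (fun m => by have := brandStarts_le m; omega)
          brandStarts.length 0 brandStarts.length (by simp [brandStarts]) (by omega)
        simpa [brandStarts] using this
      rw [this]; rfl
    · -- 0 ≤ i ≤ 61: finite check
      rw [Int.not_lt] at hlo; rw [Int.not_le] at hhi
      interval_cases i <;> decide

-- the fold that appends one element per input equals a map (from any accumulator)
theorem foldl_append_singleton_eq_map (f : Int → Int) (xs : List Int) (acc : List Int) :
    xs.foldl (fun a i => a ++ [f i]) acc = acc ++ xs.map f := by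
  induction xs generalizing acc with
  | nil => simp
  | cons x xs ih => simp [List.foldl_cons, ih]

-- ===== VERDICT (by name: the statement is the Claim_ definition above) =====
theorem brand_mod_spec : Claim_equal_brand_mod := by
  intro x_list _
  unfold Spec_brand_mod brand_mod brand_mod_alt
  have hA : x_list.foldl
      (fun new_list i =>
        if i ∈ ([0,1,2,3,4,5,6,7,8,9,10,11,12,13,14,15,44,45,48,49,54,55,56,57,58] : List Int) then new_list ++ [1]
        else if i ∈ ([16,17,42,43,61] : List Int) then new_list ++ [2]
        else if i ∈ ([18,19,20,21,22,23,24,25,26,27,28,29,30,31,32,33,50,51,52,53,59] : List Int) then new_list ++ [3]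
        else new_list ++ [4]) [] = x_list.map brandA := by
    have := foldl_append_singleton_eq_map brandA x_list []
    simp only [List.nil_append] at this
    rw [← this]
    congr 1; funext a i
    unfold brandA; split_ifs <;> rfl
  have hB : x_list.foldl
      (fun out i =>
        if i < brandStarts.getD 0 0 then out ++ [4]
        else out ++ [brandCodes.getD (brandBisect i brandStarts.length 0 brandStarts.length - 1) 4]) []
      = x_list.map brandB := by
    have := foldl_append_singleton_eq_map brandB x_list []
    simp only [List.nil_append] at this
    rw [← this]
    congr 1; funext a i
    unfold brandB; split_ifs <;> rfl
  rw [hA, hB]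
  exact List.map_congr_left (fun i _ => brandA_eq_brandB i)
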